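-- pv_equiv track=rewrite | github.com/ayoubzulfiqar/Leetcode-Medium | LexicographicallySmallestStringAfterApplyingOperations/lexicographically_smallest_string_after_applying_operations.py | findLexSmallestString
-- ===== SOURCE A (Python) =====
-- import collections
--
-- def findLexSmallestString(s: str, a: int, b: int) -> str:
--     n = len(s)
--
--     q = collections.deque()
--     q.append(s)
--
--     visited = {s}
--
--     smallest_string = s
--
--     while q:
--         curr_s = q.popleft()
--
--         if curr_s < smallest_string:
--             smallest_string = curr_s
--
--         s_list = list(curr_s)
--         for i in range(1, n, 2):
--             s_list[i] = str((int(s_list[i]) + a) % 10)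
--         next_s_add = "".join(s_list)
--
--         if next_s_add not in visited:
--             visited.add(next_s_add)
--             q.append(next_s_add)
--
--         next_s_rotate = curr_s[-b:] + curr_s[:-b]
--
--         if next_s_rotate not in visited:
--             visited.add(next_s_rotate)
--             q.append(next_s_rotate)
--
--     return smallest_string
-- ===== SOURCE B (Python) =====
-- def findLexSmallestString(s: str, a: int, b: int) -> str:
--     # Fixed-point saturation instead of a worklist search: both operations have
--     # finite order (adding a ten times is the identity mod 10; rotating len(s)
--     # times returns to the start), so repeatedly replacing the current set by
--     # the union of every element's full rotation cycle and full addition cycle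
--     # reaches the closure of {s} under the two operations; answer = its min.
--     def rotate(t):
--         return t[-b:] + t[:-b]
--
--     def add_odd(t):
--         return "".join(str((int(c) + a) % 10) if i % 2 else c
--                        for i, c in enumerate(t))
--
--     def rot_cycle(t):
--         out = []
--         for _ in range(len(t) + 1):  # rotation order divides len(t)
--             out.append(t)
--             t = rotate(t)
--         return out
--
--     def add_cycle(t):
--         out = []
--         for _ in range(10):          # adding a 10 times is the identity
--             out.append(t)
--             t = add_odd(t)
--         return out
--
--     reach = {s}
--     while True:
--         nxt = set()
--         for t in reach:
--             nxt.update(rot_cycle(t))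
--             nxt.update(add_cycle(t))
--         if all(v in reach for v in nxt):
--             return min(reach)
--         reach = nxt
-- ===== Notes on version B (the rewrite author's own statement) =====
-- stated objective: alternative
-- what changed: Replaces A's BFS worklist (deque + visited set + running minimum) by fixed-point saturation that exploits the finite order of both operations: each round replaces the current set by the union of every member's full rotation cycle (len(s)+1 iterates, since the rotation's order divides len(s)) and full addition cycle (10 iterates, since adding a ten times is the identity mod 10), stops when the set no longer grows, and returns min() of the closure.
import Mathlib
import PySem

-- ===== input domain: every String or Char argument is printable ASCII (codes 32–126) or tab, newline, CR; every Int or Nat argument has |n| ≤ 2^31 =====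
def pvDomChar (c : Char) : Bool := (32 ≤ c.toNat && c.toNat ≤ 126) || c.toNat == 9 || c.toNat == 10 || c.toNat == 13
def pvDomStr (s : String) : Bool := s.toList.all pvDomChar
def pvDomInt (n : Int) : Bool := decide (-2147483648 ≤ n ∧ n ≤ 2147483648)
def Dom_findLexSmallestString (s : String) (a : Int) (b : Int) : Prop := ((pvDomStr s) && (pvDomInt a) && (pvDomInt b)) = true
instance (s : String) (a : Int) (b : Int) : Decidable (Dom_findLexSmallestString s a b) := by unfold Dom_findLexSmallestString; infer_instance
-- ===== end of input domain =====

-- B replaces A's BFS worklist by fixed-point saturation with the two operations' closed-form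
-- cycles (addition has order ≤ 10, rotation order divides the length): same answer, no worklist.

-- ===== PORT A =====
-- s_list = list(curr_s); for i in range(1, n, 2): s_list[i] = str((int(s_list[i]) + a) % 10); "".join(s_list)
-- (the Python list of 1-character strings is List (List Char); int(c) via PySem.Int.ofChars?,
--  whose `none` case — a ValueError in Python — is excluded by Pre_; `.getD 0` is unreachable there)
def pvAddA (a : Int) (n : Nat) (t : String) : String :=
  let sl : List (List Char) := t.toList.map (fun c => [c])
  let sl := (PySem.List.pyRange 1 (n : Int) 2).foldl
    (fun l i => PySem.List.pySetD l i
      (PySem.Int.toChars (PySem.Int.mod ((PySem.Int.ofChars? (PySem.List.pyGetD l i [])).getD 0 + a) 10))) sl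
  String.ofList sl.flatten

-- curr_s[-b:] + curr_s[:-b]
def pvRotA (b : Int) (t : String) : String :=
  String.ofList (PySem.List.slice t.toList (some (-b)) none ++ PySem.List.slice t.toList none (some (-b)))

-- the while-loop of A; fuel only bounds the number of iterations and is chosen large enough
-- (the proofs show the queue always empties first)
def pvLoopA (a b : Int) (n : Nat) : Nat → List String → PySem.Set String → String → String
  | 0, _, _, m => m
  | _ + 1, [], _, m => m
  | fuel + 1, c :: q, v, m =>
    let m := if c < m then c else m
    let na := pvAddA a n c
    let (q, v) := if PySem.Set.contains v na then (q, v) else (q ++ [na], PySem.Set.add v na)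
    let nr := pvRotA b c
    let (q, v) := if PySem.Set.contains v nr then (q, v) else (q ++ [nr], PySem.Set.add v nr)
    pvLoopA a b n fuel q v m

def findLexSmallestString (s : String) (a : Int) (b : Int) : String :=
  let n := s.toList.length
  pvLoopA a b n (2 * (n + 10) ^ n + 1) [s] (PySem.Set.ofList [s]) s

-- ===== PORT B =====
-- "".join(str((int(c) + a) % 10) if i % 2 else c for i, c in enumerate(t))
def pvAddB (a : Int) (t : String) : String :=
  String.ofList (((PySem.List.enumerate t.toList).map
    (fun p => if PySem.Int.mod p.1 2 == 1
      then PySem.Int.toChars (PySem.Int.mod ((PySem.Int.ofChars? [p.2]).getD 0 + a) 10)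
      else [p.2])).flatten)

-- t[-b:] + t[:-b]
def pvRotB (b : Int) (t : String) : String :=
  String.ofList (PySem.List.slice t.toList (some (-b)) none ++ PySem.List.slice t.toList none (some (-b)))

-- out = []; for _ in range(k): out.append(t); t = g(t); return out
def pvCycle (g : String → String) (k : Nat) (t : String) : List String :=
  ((List.range k).foldl (fun (p : List String × String) _ => (p.1 ++ [p.2], g p.2)) ([], t)).1

-- rot_cycle(t): k = len(t) + 1 (rotation order divides len(t))
def pvRotCycle (b : Int) (t : String) : List String := pvCycle (pvRotB b) (t.toList.length + 1) t
-- add_cycle(t): k = 10 (adding a ten times is the identity mod 10)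
def pvAddCycle (a : Int) (t : String) : List String := pvCycle (pvAddB a) 10 t

-- nxt = set(); for t in reach: nxt.update(rot_cycle(t)); nxt.update(add_cycle(t))
def pvStepB (a b : Int) (reach : PySem.Set String) : PySem.Set String :=
  reach.foldl (fun acc t => PySem.Set.update (PySem.Set.update acc (pvRotCycle b t)) (pvAddCycle a t))
    PySem.Set.empty

-- the while-True loop of B; fuel only bounds the number of saturation rounds and is chosen
-- large enough (the proofs show the set stops growing first)
def pvLoopB (a b : Int) : Nat → PySem.Set String → PySem.Set String
  | 0, reach => reach
  | fuel + 1, reach =>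
    let nxt := pvStepB a b reach
    if nxt.all (fun v => PySem.Set.contains reach v) then reach
    else pvLoopB a b fuel nxt

def findLexSmallestString_alt (s : String) (a : Int) (b : Int) : String :=
  let n := s.toList.length
  let reach := pvLoopB a b ((n + 10) ^ n + 2) (PySem.Set.ofList [s])
  (PySem.List.min? reach (fun x => x)).getD s   -- min(reach); reach always contains s, so never none

-- ===== PRECONDITION & SPEC =====
-- the rotation actually performed by curr[-b:] + curr[:-b] (identity when |b| ≥ n or b = 0)
def pvEffRot (n : Nat) (b : Int) : Nat :=
  if b = 0 ∨ (n : Int) ≤ b ∨ b ≤ -(n : Int) then 0 else (PySem.Int.mod b (n : Int)).toNat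
def pvStride (n : Nat) (b : Int) : Nat :=
  if pvEffRot n b = 0 then n else Nat.gcd (pvEffRot n b) n

-- Pre_ excludes exactly the inputs on which A raises ValueError: int() is applied to every
-- character that ever lands on an odd index in some reachable rotation of s, i.e. every
-- position p with p ≡ i (mod gcd(rot, n)) for some odd i < n; all such chars must be digits.
def Pre_findLexSmallestString (s : String) (a : Int) (b : Int) : Prop :=
  s.toList.length ≤ 1 ∨
  (∀ p ∈ List.range s.toList.length,
     (∃ i ∈ List.range s.toList.length,
        i % 2 = 1 ∧ i % (pvStride s.toList.length b) = p % (pvStride s.toList.length b)) →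
     (s.toList.getD p ' ').isDigit = true)
instance (s : String) (a : Int) (b : Int) : Decidable (Pre_findLexSmallestString s a b) := by
  unfold Pre_findLexSmallestString; infer_instance

def pvWitness_findLexSmallestString : String × Int × Int := ("12", 1, 1)

def Spec_findLexSmallestString (s : String) (a : Int) (b : Int) (out : String) : Prop := out = findLexSmallestString_alt s a b
instance (s : String) (a : Int) (b : Int) (out : String) : Decidable (Spec_findLexSmallestString s a b out) := by unfold Spec_findLexSmallestString; infer_instance

-- ===== CLAIM (what is proved, stated in full; the proofs are below) =====
def Claim_equal_findLexSmallestString : Prop := ∀ (s : String) (a : Int) (b : Int), Dom_findLexSmallestString s a b → Pre_findLexSmallestString s a b → Spec_findLexSmallestString s a b (findLexSmallestString s a b)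

-- ===== LEMMAS AND PROOFS =====

def pvDigits : List Char := ['0', '1', '2', '3', '4', '5', '6', '7', '8', '9']
def pvVal (a : Int) (c : Char) : Int := PySem.Int.mod ((PySem.Int.ofChars? [c]).getD 0 + a) 10
def pvDch (a : Int) (c : Char) : Char := Char.ofNat (48 + (pvVal a c).toNat)
def pvCanon (a : Int) (cs : List Char) : List Char :=
  cs.mapIdx (fun i c => if i % 2 = 1 then pvDch a c else c)
def pvGood (n : Nat) (A0 : List Char) (t : String) : Prop :=
  t.toList.length = n ∧ ∀ c ∈ t.toList, c ∈ A0
def pvKS (n : Nat) : List Nat := (List.range (n / 2)).map (fun k => 2 * k + 1)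

-- reachability by the two operations, and reachability from a set
inductive pvReach (f g : String → String) : String → String → Prop
  | refl (x) : pvReach f g x x
  | add {x y} : pvReach f g x y → pvReach f g x (f y)
  | rot {x y} : pvReach f g x y → pvReach f g x (g y)
def pvRS (f g : String → String) (v : List String) (y : String) : Prop :=
  ∃ x ∈ v, pvReach f g x y

-- all char-lists of length k over alphabet A0 (used only to bound the visited set)
def pvStrs (A0 : List Char) : Nat → List (List Char)
  | 0 => [[]]
  | k + 1 => A0.flatMap (fun c => (pvStrs A0 k).map (c :: ·))

theorem pvReach_trans {f g : String → String} {x y z : String}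
    (h1 : pvReach f g x y) (h2 : pvReach f g y z) : pvReach f g x z := by
  induction h2 with
  | refl => exact h1
  | add _ ih => exact .add ih
  | rot _ ih => exact .rot ih

theorem pv_mem_strs (A0 : List Char) : ∀ (k : Nat) (l : List Char),
    l ∈ pvStrs A0 k ↔ l.length = k ∧ ∀ c ∈ l, c ∈ A0 := by
  intro k
  induction k with
  | zero => intro l; simp [pvStrs, List.length_eq_zero_iff]; rintro rfl; simp
  | succ k ih =>
    intro l
    simp only [pvStrs, List.mem_flatMap, List.mem_map]
    constructor
    · rintro ⟨c, hc, l', hl', rfl⟩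
      obtain ⟨hlen, hall⟩ := (ih l').1 hl'
      refine ⟨by simp [hlen], ?_⟩
      intro x hx
      rcases List.mem_cons.1 hx with rfl | hx
      · exact hc
      · exact hall x hx
    · rintro ⟨hlen, hall⟩
      cases l with
      | nil => simp at hlen
      | cons c l' =>
        refine ⟨c, hall c (by simp), l',
          (ih l').2 ⟨by simpa using hlen, fun x hx => hall x (by simp [hx])⟩, rfl⟩

theorem pv_length_strs (A0 : List Char) : ∀ k, (pvStrs A0 k).length = A0.length ^ k := by
  intro k
  induction k with
  | zero => simp [pvStrs]
  | succ k ih => simp [pvStrs, List.length_flatMap, ih, pow_succ, Nat.mul_comm]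

theorem pv_card_bound (n : Nat) (A0 : List Char) (v : List String)
    (hnd : v.Nodup) (hg : ∀ x ∈ v, pvGood n A0 x) : v.length ≤ A0.length ^ n := by
  have hmapnd : (v.map String.toList).Nodup :=
    hnd.map (fun a b h => String.toList_inj.mp h)
  have hsub : (v.map String.toList) ⊆ pvStrs A0 n := by
    intro l hl
    obtain ⟨x, hx, rfl⟩ := List.mem_map.1 hl
    exact (pv_mem_strs A0 n _).2 ⟨(hg x hx).1, (hg x hx).2⟩
  calc v.length = (v.map String.toList).length := (List.length_map ..).symm
    _ ≤ (pvStrs A0 n).length := (List.subperm_of_subset hmapnd hsub).length_le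
    _ = A0.length ^ n := pv_length_strs A0 n

theorem pv_toChars_small (v : Int) (h0 : 0 ≤ v) (h9 : v < 10) :
    PySem.Int.toChars v = [Char.ofNat (48 + v.toNat)] := by
  interval_cases v <;> rfl

theorem pv_dch_mem (a : Int) (c : Char) : pvDch a c ∈ pvDigits := by
  have h0 : 0 ≤ pvVal a c := PySem.Int.mod_nonneg _ (by norm_num)
  have h9 : pvVal a c < 10 := PySem.Int.mod_lt _ (by norm_num)
  have hn : (pvVal a c).toNat < 10 := by omega
  unfold pvDch
  interval_cases h : (pvVal a c).toNat <;> simp [pvDigits]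

theorem pv_KS_nodup (n : Nat) : (pvKS n).Nodup :=
  (List.nodup_range).map (fun x y h => by omega)

theorem pv_KS_mem (n : Nat) (i : Nat) : i ∈ pvKS n ↔ (i % 2 = 1 ∧ i < n) := by
  unfold pvKS
  simp only [List.mem_map, List.mem_range]
  constructor
  · rintro ⟨k, hk, rfl⟩; omega
  · rintro ⟨h1, h2⟩; exact ⟨i / 2, by omega, by omega⟩

-- range(1, n, 2) is the list of odd naturals below n
theorem pv_pyRange_odd (n : Nat) :
    PySem.List.pyRange 1 (n : Int) 2 = (pvKS n).map (fun k : Nat => (k : Int)) := by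
  rw [PySem.List.pyRange_of_pos 1 (n : Int) (show (0:Int) < 2 by norm_num)]
  unfold pvKS
  rw [List.map_map]
  have hcnt : (if (1:Int) < (n:Int) then (((n:Int) - 1 + 2 - 1) / 2).toNat else 0) = n / 2 := by
    by_cases h : (1:Int) < (n:Int)
    · rw [if_pos h]
      have h2 : ((n:Int) - 1 + 2 - 1) = (n : Int) := by ring
      rw [h2]
      rw [show ((n:Int) / 2) = ((n / 2 : Nat) : Int) from (Int.natCast_div n 2), Int.toNat_natCast]
    · rw [if_neg h]; omega
  rw [hcnt]
  apply List.map_congr_left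
  intro k hk
  simp only [Function.comp]
  push_cast
  ring

-- writing distinct in-range positions one by one is a mapIdx
theorem pv_foldl_pySetD {α : Type} (g : α → α) (d : α) :
    ∀ (ks : List Nat) (l : List α), ks.Nodup → (∀ k ∈ ks, k < l.length) →
    (ks.map (fun k : Nat => (k : Int))).foldl
      (fun l i => PySem.List.pySetD l i (g (PySem.List.pyGetD l i d))) l
    = l.mapIdx (fun i e => if i ∈ ks then g e else e) := by
  intro ks
  induction ks with
  | nil =>
    intro l _ _
    show l = _
    apply List.ext_getElem (by simp)
    intro i h1 h2
    simp [List.getElem_mapIdx]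
  | cons k ks ih =>
    intro l hnd hlt
    show (ks.map (fun k : Nat => (k : Int))).foldl _
        (PySem.List.pySetD l (k : Int) (g (PySem.List.pyGetD l (k : Int) d))) = _
    rw [PySem.List.pySetD_natCast, PySem.List.pyGetD_natCast,
        List.getD_eq_getElem l d (hlt k (by simp))]
    rw [ih _ (hnd.of_cons) (by intro j hj; rw [List.length_set]; exact hlt j (by simp [hj]))]
    apply List.ext_getElem (by simp)
    intro i h1 h2
    simp only [List.getElem_mapIdx, List.getElem_set]
    have hknotks : k ∉ ks := (List.nodup_cons.1 hnd).1
    by_cases hik : k = i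
    · subst hik
      simp [hknotks]
    · simp only [if_neg hik, List.mem_cons]
      by_cases hiks : i ∈ ks
      · simp [hiks]
      · have hcond : ¬ (i = k ∨ i ∈ ks) := by
          rintro (rfl | h)
          · exact hik rfl
          · exact hiks h
        rw [if_neg hiks, if_neg hcond]

theorem pv_addA_eq_canon (a : Int) (n : Nat) (t : String) (hn : t.toList.length = n) :
    pvAddA a n t = String.ofList (pvCanon a t.toList) := by
  simp only [pvAddA]
  rw [pv_pyRange_odd n,
      pv_foldl_pySetD (fun e => PySem.Int.toChars (PySem.Int.mod ((PySem.Int.ofChars? e).getD 0 + a) 10)) []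
        (pvKS n) _ (pv_KS_nodup n)
        (by intro k hk; rw [List.length_map, hn]; exact ((pv_KS_mem n k).1 hk).2)]
  congr 1
  have hmapIdx : (t.toList.map (fun c => [c])).mapIdx
      (fun i e => if i ∈ pvKS n then PySem.Int.toChars (PySem.Int.mod ((PySem.Int.ofChars? e).getD 0 + a) 10) else e)
      = (pvCanon a t.toList).map (fun c => [c]) := by
    apply List.ext_getElem (by simp [pvCanon])
    intro i h1 h2
    simp only [List.getElem_mapIdx, List.getElem_map, pvCanon]
    have hilen : i < t.toList.length := by simpa using h1
    by_cases hodd : i % 2 = 1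
    · rw [if_pos ((pv_KS_mem n i).2 ⟨hodd, by omega⟩), if_pos hodd]
      exact pv_toChars_small (pvVal a t.toList[i])
        (PySem.Int.mod_nonneg _ (by norm_num)) (PySem.Int.mod_lt _ (by norm_num))
    · rw [if_neg (fun h => hodd ((pv_KS_mem n i).1 h).1), if_neg hodd]
  rw [hmapIdx]
  induction pvCanon a t.toList with
  | nil => rfl
  | cons c l ih => simp [ih]

theorem pv_addB_eq_canon (a : Int) (t : String) :
    pvAddB a t = String.ofList (pvCanon a t.toList) := by
  unfold pvAddB
  congr 1
  have hmap : (PySem.List.enumerate t.toList).map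
      (fun p => if PySem.Int.mod p.1 2 == 1
        then PySem.Int.toChars (PySem.Int.mod ((PySem.Int.ofChars? [p.2]).getD 0 + a) 10)
        else [p.2])
      = (pvCanon a t.toList).map (fun c => [c]) := by
    apply List.ext_getElem (by simp [pvCanon, PySem.List.length_enumerate])
    intro i h1 h2
    simp only [List.getElem_map, PySem.List.getElem_enumerate, pvCanon, List.getElem_mapIdx]
    have hcond : (PySem.Int.mod ((0 : Int) + (i : Int)) 2 == 1) = (i % 2 = 1 : Bool) := by
      rw [zero_add, PySem.Int.mod_eq_emod_of_pos (show (0:Int) < 2 by norm_num),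
          show ((i : Int) % 2) = ((i % 2 : Nat) : Int) from by push_cast; ring]
      rcases Nat.mod_two_eq_zero_or_one i with h | h <;> rw [h] <;> rfl
    rw [hcond]
    by_cases hodd : i % 2 = 1
    · simp only [hodd, decide_true, if_pos]
      exact pv_toChars_small _ (PySem.Int.mod_nonneg _ (by norm_num))
        (PySem.Int.mod_lt _ (by norm_num))
    · simp [hodd]
  rw [hmap]
  induction pvCanon a t.toList with
  | nil => rfl
  | cons c l ih => simp [ih]

theorem pv_rot_eq (b : Int) (t : String) :
    pvRotA b t = String.ofList
      (t.toList.drop (PySem.List.clampIdx t.toList.length (-b)) ++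
       t.toList.take (PySem.List.clampIdx t.toList.length (-b))) := by
  unfold pvRotA
  rw [PySem.List.slice_some_none]
  congr 2

theorem pv_mem_canon (a : Int) (cs : List Char) (c : Char) (h : c ∈ pvCanon a cs) :
    c ∈ cs ∨ c ∈ pvDigits := by
  unfold pvCanon at h
  obtain ⟨i, hi, rfl⟩ := List.mem_iff_getElem.1 h
  rw [List.getElem_mapIdx]
  by_cases hodd : (i % 2 = 1)
  · rw [if_pos hodd]; exact Or.inr (pv_dch_mem a _)
  · rw [if_neg hodd]; exact Or.inl (List.getElem_mem _)

theorem pv_good_addA (a : Int) (n : Nat) (A0 : List Char) (hd : ∀ c ∈ pvDigits, c ∈ A0)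
    (t : String) (h : pvGood n A0 t) : pvGood n A0 (pvAddA a n t) := by
  rw [pv_addA_eq_canon a n t h.1]
  constructor
  · simp [pvCanon, h.1]
  · intro c hc
    simp only [String.toList_ofList] at hc
    rcases pv_mem_canon a t.toList c hc with h2 | h2
    · exact h.2 c h2
    · exact hd c h2

theorem pv_good_rotA (b : Int) (n : Nat) (A0 : List Char)
    (t : String) (h : pvGood n A0 t) : pvGood n A0 (pvRotA b t) := by
  rw [pv_rot_eq]
  constructor
  · have hle := PySem.List.clampIdx_le t.toList.length (-b)
    simp only [String.toList_ofList, List.length_append, List.length_drop, List.length_take]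
    rw [Nat.min_eq_left hle]
    have := h.1
    omega
  · intro c hc
    simp only [String.toList_ofList, List.mem_append] at hc
    rcases hc with h2 | h2
    · exact h.2 c (List.mem_of_mem_drop h2)
    · exact h.2 c (List.mem_of_mem_take h2)

theorem pv_ops_agree_add (a : Int) (n : Nat) (A0 : List Char) (t : String)
    (h : pvGood n A0 t) : pvAddA a n t = pvAddB a t := by
  rw [pv_addA_eq_canon a n t h.1, pv_addB_eq_canon]

theorem pv_closed (F G : String → String) (v : List String)
    (hcl : ∀ x ∈ v, F x ∈ v ∧ G x ∈ v) :
    ∀ {x y}, pvReach F G x y → x ∈ v → y ∈ v := by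
  intro x y h hx
  induction h with
  | refl => exact hx
  | add _ ih => exact (hcl _ ih).1
  | rot _ ih => exact (hcl _ ih).2

-- one conditional insertion step of A's loop
theorem pv_set_step {q v : List String} {u : String} (hnd : v.Nodup) :
    ∃ news : List String,
      (if PySem.Set.contains v u then (q, v) else (q ++ [u], PySem.Set.add v u))
        = (q ++ news, v ++ news)
      ∧ (news = [] ∨ news = [u]) ∧ (u ∈ v ↔ news = []) ∧ (∀ x ∈ news, x ∉ v)
      ∧ u ∈ v ++ news ∧ (v ++ news).Nodup := by
  by_cases h : u ∈ v
  · refine ⟨[], ?_⟩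
    rw [if_pos (by simpa [PySem.Set.contains_iff])]
    simp [h, hnd]
  · refine ⟨[u], ?_⟩
    rw [if_neg (by simpa [PySem.Set.contains_iff]), PySem.Set.add_of_not_mem h]
    refine ⟨rfl, by simp, by simp [h], by simp [h], by simp, ?_⟩
    rw [List.nodup_append]
    exact ⟨hnd, List.nodup_singleton u,
      by intro x hx y hy; rw [List.mem_singleton] at hy; subst hy; intro e; subst e; exact h hx⟩

-- transferring an IsLeast fact backwards across one loop iteration of A
theorem pv_transfer (F G : String → String) (q' v news : List String) (c m r : String)
    (hc : c ∈ v)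
    (hnews_img : ∀ u ∈ news, u = F c ∨ u = G c)
    (hnews_nv : ∀ u ∈ news, u ∉ v)
    (h : IsLeast { y | y = (if c < m then c else m) ∨ y ∈ q' ++ news ∨ (pvRS F G (v ++ news) y ∧ y ∉ v ++ news) } r) :
    IsLeast { y | y = m ∨ y ∈ c :: q' ∨ (pvRS F G v y ∧ y ∉ v) } r := by
  have hRSeq : ∀ y, pvRS F G (v ++ news) y ↔ pvRS F G v y := by
    intro y
    constructor
    · rintro ⟨x, hx, hr⟩
      rcases List.mem_append.1 hx with hxv | hxn
      · exact ⟨x, hxv, hr⟩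
      · rcases hnews_img x hxn with rfl | rfl
        · exact ⟨c, hc, pvReach_trans (.add (.refl c)) hr⟩
        · exact ⟨c, hc, pvReach_trans (.rot (.refl c)) hr⟩
    · rintro ⟨x, hx, hr⟩
      exact ⟨x, List.mem_append_left _ hx, hr⟩
  have hnewsRS : ∀ u ∈ news, pvRS F G v u := by
    intro u hu
    rcases hnews_img u hu with rfl | rfl
    · exact ⟨c, hc, .add (.refl c)⟩
    · exact ⟨c, hc, .rot (.refl c)⟩
  obtain ⟨hmem, hlb⟩ := h
  constructor
  · rcases hmem with hm' | hq | ⟨hRS, hnv⟩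
    · by_cases hcm : c < m
      · rw [if_pos hcm] at hm'
        exact Or.inr (Or.inl (hm' ▸ List.mem_cons_self))
      · rw [if_neg hcm] at hm'
        exact Or.inl hm'
    · rcases List.mem_append.1 hq with h1 | h1
      · exact Or.inr (Or.inl (List.mem_cons_of_mem c h1))
      · exact Or.inr (Or.inr ⟨hnewsRS _ h1, hnews_nv _ h1⟩)
    · exact Or.inr (Or.inr ⟨(hRSeq r).1 hRS, fun hv => hnv (List.mem_append_left _ hv)⟩)
  · rintro y (rfl | hy | ⟨hRS, hnv⟩)
    · refine le_trans (hlb (Or.inl rfl)) ?_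
      split_ifs with h
      · exact le_of_lt h
      · exact le_refl y
    · rcases List.mem_cons.1 hy with rfl | hy'
      · refine le_trans (hlb (Or.inl rfl)) ?_
        split_ifs with h
        · exact le_refl y
        · exact le_of_not_gt h
      · exact hlb (Or.inr (Or.inl (List.mem_append_left _ hy')))
    · by_cases hyn : y ∈ news
      · exact hlb (Or.inr (Or.inl (List.mem_append_right _ hyn)))
      · refine hlb (Or.inr (Or.inr ⟨(hRSeq y).2 hRS, ?_⟩))
        rw [List.mem_append]
        rintro (h | h)
        · exact hnv h
        · exact hyn h

-- A's loop returns the least element of {m} ∪ queue ∪ (reachable-from-v but unvisited)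
theorem pv_loopA_least (a b : Int) (n N : Nat) (G : String → Prop)
    (hGadd : ∀ t, G t → G (pvAddA a n t)) (hGrot : ∀ t, G t → G (pvRotA b t))
    (hN : ∀ v : List String, v.Nodup → (∀ x ∈ v, G x) → v.length ≤ N) :
    ∀ (fuel : Nat) (q v : List String) (m : String),
      v.Nodup → (∀ x ∈ q, x ∈ v) →
      (∀ x ∈ v, x ∈ q ∨ (pvAddA a n x ∈ v ∧ pvRotA b x ∈ v)) →
      (∀ x ∈ v, G x) →
      2 * (N - v.length) + q.length < fuel →
      IsLeast { y | y = m ∨ y ∈ q ∨ (pvRS (pvAddA a n) (pvRotA b) v y ∧ y ∉ v) }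
        (pvLoopA a b n fuel q v m) := by
  intro fuel
  induction fuel with
  | zero => intro q v m _ _ _ _ hfuel; omega
  | succ f IH =>
    intro q v m hnd hqv hcl hG hfuel
    cases q with
    | nil =>
      have hvclosed : ∀ x ∈ v, pvAddA a n x ∈ v ∧ pvRotA b x ∈ v := by
        intro x hx
        rcases hcl x hx with h | h
        · exact absurd h (List.not_mem_nil)
        · exact h
      constructor
      · exact Or.inl rfl
      · rintro y (rfl | hy | ⟨⟨x, hx, hr⟩, hnv⟩)
        · exact le_refl _
        · exact absurd hy (List.not_mem_nil)
        · exact absurd (pv_closed _ _ v hvclosed hr hx) hnv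
    | cons c q' =>
      have hcv : c ∈ v := hqv c List.mem_cons_self
      obtain ⟨n1, heq1, hn1s, hn1iff, hn1nv, hmem1, hnd1⟩ :=
        pv_set_step (q := q') (v := v) (u := pvAddA a n c) hnd
      obtain ⟨n2, heq2, hn2s, hn2iff, hn2nv, hmem2, hnd2⟩ :=
        pv_set_step (q := q' ++ n1) (v := v ++ n1) (u := pvRotA b c) hnd1
      have hstep : pvLoopA a b n (f + 1) (c :: q') v m
          = pvLoopA a b n f ((q' ++ n1) ++ n2) ((v ++ n1) ++ n2) (if c < m then c else m) := by
        simp only [pvLoopA]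
        rw [heq1, heq2]
      rw [hstep]
      have himg1 : ∀ u ∈ n1, u = pvAddA a n c := by
        rcases hn1s with rfl | rfl <;> intro u hu <;> simp_all
      have himg2 : ∀ u ∈ n2, u = pvRotA b c := by
        rcases hn2s with rfl | rfl <;> intro u hu <;> simp_all
      have himg : ∀ u ∈ n1 ++ n2, u = pvAddA a n c ∨ u = pvRotA b c := by
        intro u hu
        rcases List.mem_append.1 hu with h | h
        · exact Or.inl (himg1 u h)
        · exact Or.inr (himg2 u h)
      have hnv12 : ∀ u ∈ n1 ++ n2, u ∉ v := by
        intro u hu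
        rcases List.mem_append.1 hu with h | h
        · exact hn1nv u h
        · exact fun hv => hn2nv u h (List.mem_append_left _ hv)
      have hG2 : ∀ x ∈ (v ++ n1) ++ n2, G x := by
        intro x hx
        rcases List.mem_append.1 hx with hx | hx
        · rcases List.mem_append.1 hx with hx | hx
          · exact hG x hx
          · rw [himg1 x hx]; exact hGadd c (hG c hcv)
        · rw [himg2 x hx]; exact hGrot c (hG c hcv)
      have hqv2 : ∀ x ∈ (q' ++ n1) ++ n2, x ∈ (v ++ n1) ++ n2 := by
        intro x hx
        rcases List.mem_append.1 hx with hx | hx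
        · rcases List.mem_append.1 hx with hx | hx
          · exact List.mem_append_left _ (List.mem_append_left _ (hqv x (List.mem_cons_of_mem c hx)))
          · exact List.mem_append_left _ (List.mem_append_right _ hx)
        · exact List.mem_append_right _ hx
      have hcl2 : ∀ x ∈ (v ++ n1) ++ n2,
          x ∈ (q' ++ n1) ++ n2 ∨ (pvAddA a n x ∈ (v ++ n1) ++ n2 ∧ pvRotA b x ∈ (v ++ n1) ++ n2) := by
        intro x hx
        rcases List.mem_append.1 hx with hx | hx
        · rcases List.mem_append.1 hx with hx | hx
          · rcases hcl x hx with hq | hclosed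
            · rcases List.mem_cons.1 hq with rfl | hq'
              · exact Or.inr ⟨List.mem_append_left _ hmem1, hmem2⟩
              · exact Or.inl (List.mem_append_left _ (List.mem_append_left _ hq'))
            · exact Or.inr ⟨List.mem_append_left _ (List.mem_append_left _ hclosed.1),
                List.mem_append_left _ (List.mem_append_left _ hclosed.2)⟩
          · exact Or.inl (List.mem_append_left _ (List.mem_append_right _ hx))
        · exact Or.inl (List.mem_append_right _ hx)
      have hvN : ((v ++ n1) ++ n2).length ≤ N := hN _ hnd2 hG2
      have hfuel2 : 2 * (N - ((v ++ n1) ++ n2).length) + ((q' ++ n1) ++ n2).length < f := by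
        simp only [List.length_append, List.length_cons] at *
        omega
      have IH' := IH ((q' ++ n1) ++ n2) ((v ++ n1) ++ n2) (if c < m then c else m)
        hnd2 hqv2 hcl2 hG2 hfuel2
      simp only [List.append_assoc] at IH' ⊢
      exact pv_transfer (pvAddA a n) (pvRotA b) q' v (n1 ++ n2) c m _ hcv himg hnv12 IH'

-- ===== B-side lemmas: cycles, one saturation round, the fixpoint loop =====

-- the collecting fold of a cycle is the list of iterates
theorem pv_cycle_fold (g : String → String) : ∀ (k : Nat) (t : String),
    ((List.range k).foldl (fun (p : List String × String) _ => (p.1 ++ [p.2], g p.2)) ([], t))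
      = ((List.range k).map (fun j => g^[j] t), g^[k] t) := by
  intro k t
  induction k with
  | zero => simp
  | succ k ih =>
    rw [List.range_succ, List.foldl_append, ih, List.map_append, List.foldl_cons, List.foldl_nil]
    simp [Function.iterate_succ_apply']

theorem pv_cycle_eq (g : String → String) (k : Nat) (t : String) :
    pvCycle g k t = (List.range k).map (fun j => g^[j] t) := by
  unfold pvCycle
  rw [pv_cycle_fold]

theorem pv_self_mem_cycle (g : String → String) (k : Nat) (t : String) (hk : 0 < k) :
    t ∈ pvCycle g k t := by
  rw [pv_cycle_eq]
  exact List.mem_map.2 ⟨0, List.mem_range.2 hk, rfl⟩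

theorem pv_app_mem_cycle (g : String → String) (k : Nat) (t : String) (hk : 1 < k) :
    g t ∈ pvCycle g k t := by
  rw [pv_cycle_eq]
  exact List.mem_map.2 ⟨1, List.mem_range.2 hk, by simp⟩

theorem pv_rotB_empty (b : Int) (t : String) (h : t.toList.length = 0) : pvRotB b t = t := by
  have hnil : t.toList = [] := List.length_eq_zero_iff.1 h
  show pvRotA b t = t
  rw [pv_rot_eq, hnil]
  simp only [List.drop_nil, List.take_nil, List.append_nil]
  rw [← hnil, String.ofList_toList]

theorem pv_rot_mem_rotCycle (b : Int) (t : String) : pvRotB b t ∈ pvRotCycle b t := by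
  unfold pvRotCycle
  cases h : t.toList.length with
  | zero =>
    rw [pv_rotB_empty b t h]
    exact pv_self_mem_cycle _ _ _ (by omega)
  | succ n' =>
    exact pv_app_mem_cycle _ _ _ (by omega)

theorem pv_iterate_reach_add (f g : String → String) (t : String) :
    ∀ j, pvReach f g t (f^[j] t) := by
  intro j
  induction j with
  | zero => exact .refl t
  | succ j ih => rw [Function.iterate_succ_apply']; exact .add ih

theorem pv_iterate_reach_rot (f g : String → String) (t : String) :
    ∀ j, pvReach f g t (g^[j] t) := by
  intro j
  induction j with
  | zero => exact .refl t
  | succ j ih => rw [Function.iterate_succ_apply']; exact .rot ih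

theorem pv_cycle_reach {f g : String → String} {a b : Int} {t y : String}
    (hf : f = pvAddB a) (hg : g = pvRotB b)
    (h : y ∈ pvRotCycle b t ∨ y ∈ pvAddCycle a t) : pvReach f g t y := by
  rcases h with h | h
  · rw [pvRotCycle, pv_cycle_eq] at h
    obtain ⟨j, _, rfl⟩ := List.mem_map.1 h
    rw [hg]; exact pv_iterate_reach_rot f _ t j
  · rw [pvAddCycle, pv_cycle_eq] at h
    obtain ⟨j, _, rfl⟩ := List.mem_map.1 h
    rw [hf]; exact pv_iterate_reach_add _ g t j

-- membership and nodup of one saturation round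
theorem pv_stepB_mem_aux (a b : Int) : ∀ (l : List String) (acc : PySem.Set String) (y : String),
    (y ∈ l.foldl (fun acc t => PySem.Set.update (PySem.Set.update acc (pvRotCycle b t)) (pvAddCycle a t)) acc
      ↔ y ∈ acc ∨ ∃ t ∈ l, y ∈ pvRotCycle b t ∨ y ∈ pvAddCycle a t) := by
  intro l
  induction l with
  | nil => intro acc y; simp
  | cons t l ih =>
    intro acc y
    rw [List.foldl_cons, ih, PySem.Set.mem_update, PySem.Set.mem_update]
    simp only [List.mem_cons]
    constructor
    · rintro (((h | h) | h) | ⟨t', ht', h⟩)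
      · exact Or.inl h
      · exact Or.inr ⟨t, Or.inl rfl, Or.inl h⟩
      · exact Or.inr ⟨t, Or.inl rfl, Or.inr h⟩
      · exact Or.inr ⟨t', Or.inr ht', h⟩
    · rintro (h | ⟨t', rfl | ht', h⟩)
      · exact Or.inl (Or.inl (Or.inl h))
      · rcases h with h | h
        · exact Or.inl (Or.inl (Or.inr h))
        · exact Or.inl (Or.inr h)
      · exact Or.inr ⟨t', ht', h⟩

theorem pv_stepB_nodup_aux (a b : Int) : ∀ (l : List String) (acc : PySem.Set String),
    acc.Nodup →
    (l.foldl (fun acc t => PySem.Set.update (PySem.Set.update acc (pvRotCycle b t)) (pvAddCycle a t)) acc).Nodup := by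
  intro l
  induction l with
  | nil => intro acc h; exact h
  | cons t l ih =>
    intro acc h
    rw [List.foldl_cons]
    exact ih _ (PySem.Set.nodup_update _ _ (PySem.Set.nodup_update _ _ h))

theorem pv_stepB_mem (a b : Int) (reach : PySem.Set String) (y : String) :
    y ∈ pvStepB a b reach ↔ ∃ t ∈ reach, y ∈ pvRotCycle b t ∨ y ∈ pvAddCycle a t := by
  unfold pvStepB
  rw [pv_stepB_mem_aux]
  simp [PySem.Set.empty]

-- B's fixpoint loop computes exactly the set of strings reachable from s
theorem pv_loopB_mem (a b : Int) (s : String) (N : Nat) (G : String → Prop)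
    (hGadd : ∀ t, G t → G (pvAddB a t)) (hGrot : ∀ t, G t → G (pvRotB b t)) (hGs : G s)
    (hN : ∀ v : List String, v.Nodup → (∀ x ∈ v, G x) → v.length ≤ N) :
    ∀ (fuel : Nat) (reach : PySem.Set String),
      reach.Nodup → s ∈ reach →
      (∀ x ∈ reach, pvReach (pvAddB a) (pvRotB b) s x) →
      N - reach.length < fuel →
      ∀ y, y ∈ pvLoopB a b fuel reach ↔ pvReach (pvAddB a) (pvRotB b) s y := by
  have hreachG : ∀ y, pvReach (pvAddB a) (pvRotB b) s y → G y := by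
    intro y h
    induction h with
    | refl => exact hGs
    | add _ ih => exact hGadd _ ih
    | rot _ ih => exact hGrot _ ih
  intro fuel
  induction fuel with
  | zero => intro reach _ _ _ hfuel; omega
  | succ f IH =>
    intro reach hnd hs hinv hfuel
    have hnxt_mem := pv_stepB_mem a b reach
    have hnxt_nd : (pvStepB a b reach).Nodup :=
      pv_stepB_nodup_aux a b reach PySem.Set.empty (List.nodup_nil)
    have hsub : ∀ x ∈ reach, x ∈ pvStepB a b reach := by
      intro x hx
      exact (hnxt_mem x).2 ⟨x, hx, Or.inl (pv_self_mem_cycle _ _ _ (by omega))⟩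
    have hnxt_inv : ∀ y ∈ pvStepB a b reach, pvReach (pvAddB a) (pvRotB b) s y := by
      intro y hy
      obtain ⟨t, ht, h⟩ := (hnxt_mem y).1 hy
      exact pvReach_trans (hinv t ht) (pv_cycle_reach rfl rfl h)
    rw [show pvLoopB a b (f + 1) reach
        = (if (pvStepB a b reach).all (fun v => PySem.Set.contains reach v)
           then reach else pvLoopB a b f (pvStepB a b reach)) from rfl]
    by_cases hall : (pvStepB a b reach).all (fun v => PySem.Set.contains reach v) = true
    · rw [if_pos hall]
      have hnxt_sub : ∀ y ∈ pvStepB a b reach, y ∈ reach := by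
        intro y hy
        exact (PySem.Set.contains_iff _ _).1 (List.all_eq_true.1 hall y hy)
      have hcl : ∀ x ∈ reach, pvAddB a x ∈ reach ∧ pvRotB b x ∈ reach := by
        intro x hx
        refine ⟨hnxt_sub _ ((hnxt_mem _).2 ⟨x, hx, Or.inr ?_⟩),
          hnxt_sub _ ((hnxt_mem _).2 ⟨x, hx, Or.inl (pv_rot_mem_rotCycle b x)⟩)⟩
        exact pv_app_mem_cycle _ _ _ (by omega)
      intro y
      constructor
      · exact fun h => hinv y h
      · intro h
        exact pv_closed _ _ reach hcl h hs
    · rw [if_neg hall]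
      have hgrow : ∃ v, v ∈ pvStepB a b reach ∧ v ∉ reach := by
        by_contra hno
        apply hall
        rw [List.all_eq_true]
        intro v hv
        by_cases hm : v ∈ reach
        · exact (PySem.Set.contains_iff _ _).2 hm
        · exact absurd ⟨hv, hm⟩ (not_exists.1 hno v)
      obtain ⟨v, hv, hvn⟩ := hgrow
      have hlen : reach.length < (pvStepB a b reach).length := by
        have hsp : (v :: reach).Subperm (pvStepB a b reach) := by
          apply List.subperm_of_subset (List.nodup_cons.2 ⟨hvn, hnd⟩)
          intro x hx
          rcases List.mem_cons.1 hx with rfl | hx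
          · exact hv
          · exact hsub x hx
        have := hsp.length_le
        simpa using this
      have hNn : (pvStepB a b reach).length ≤ N :=
        hN _ hnxt_nd (fun x hx => hreachG x (hnxt_inv x hx))
      exact IH (pvStepB a b reach) hnxt_nd (hsub s hs) hnxt_inv (by omega)

theorem pv_ports_eq (s : String) (a b : Int) :
    findLexSmallestString s a b = findLexSmallestString_alt s a b := by
  set n := s.toList.length with hn
  set A0 : List Char := s.toList ++ pvDigits with hA0
  set N : Nat := A0.length ^ n with hN0
  set G : String → Prop := pvGood n A0 with hG0
  have hdig : ∀ c ∈ pvDigits, c ∈ A0 := fun c hc => List.mem_append_right _ hc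
  have hGs : G s := ⟨rfl, fun c hc => List.mem_append_left _ hc⟩
  have hGaddA : ∀ t, G t → G (pvAddA a n t) := fun t h => pv_good_addA a n A0 hdig t h
  have hGrotA : ∀ t, G t → G (pvRotA b t) := fun t h => pv_good_rotA b n A0 t h
  have hGaddB : ∀ t, G t → G (pvAddB a t) := by
    intro t h
    rw [← pv_ops_agree_add a n A0 t h]
    exact hGaddA t h
  have hGrotB : ∀ t, G t → G (pvRotB b t) := fun t h => hGrotA t h
  have hNb : ∀ v : List String, v.Nodup → (∀ x ∈ v, G x) → v.length ≤ N :=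
    fun v h1 h2 => pv_card_bound n A0 v h1 h2
  have hone : 1 ≤ N := by
    rw [hN0]
    exact Nat.one_le_pow _ _ (by simp [hA0, pvDigits])
  have hNval : N = (n + 10) ^ n := by
    have hlA : A0.length = n + 10 := by
      simp only [hA0, List.length_append, hn]
      norm_num [pvDigits]
    rw [hN0, hlA]
  have hofl : PySem.Set.ofList [s] = ([s] : List String) := by
    simp [PySem.Set.ofList_eq_self_of_nodup]
  have hA := pv_loopA_least a b n N G hGaddA hGrotA hNb (2 * (n + 10) ^ n + 1) [s] [s] s
    (List.nodup_singleton s) (fun x hx => hx)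
    (fun x hx => Or.inl hx) (by intro x hx; rw [List.mem_singleton] at hx; subst hx; exact hGs)
    (by simp only [List.length_singleton]; omega)
  have hALeast : IsLeast { y | pvReach (pvAddA a n) (pvRotA b) s y }
      (pvLoopA a b n (2 * (n + 10) ^ n + 1) [s] [s] s) := by
    obtain ⟨hm, hlb⟩ := hA
    constructor
    · rcases hm with heq | hy | ⟨⟨x, hx, hr⟩, _⟩
      · show pvReach (pvAddA a n) (pvRotA b) s _
        rw [heq]; exact .refl s
      · rw [List.mem_singleton] at hy
        show pvReach (pvAddA a n) (pvRotA b) s _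
        rw [hy]; exact .refl s
      · rw [List.mem_singleton] at hx
        rw [hx] at hr; exact hr
    · intro y hy
      by_cases hys : y ∈ ([s] : List String)
      · rw [List.mem_singleton] at hys
        exact hlb (Or.inl hys)
      · exact hlb (Or.inr (Or.inr ⟨⟨s, List.mem_singleton_self s, hy⟩, hys⟩))
  have hBmem : ∀ y, y ∈ pvLoopB a b ((n + 10) ^ n + 2) [s] ↔
      pvReach (pvAddB a) (pvRotB b) s y := by
    exact pv_loopB_mem a b s N G hGaddB hGrotB hGs hNb ((n + 10) ^ n + 2) [s]
      (List.nodup_singleton s) (List.mem_singleton_self s)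
      (by intro x hx; rw [List.mem_singleton] at hx; rw [hx]; exact .refl s)
      (by simp only [List.length_singleton]; omega)
  have hAB : ∀ y, pvReach (pvAddA a n) (pvRotA b) s y →
      G y ∧ pvReach (pvAddB a) (pvRotB b) s y := by
    intro y h
    induction h with
    | refl => exact ⟨hGs, .refl s⟩
    | add _ ih =>
      refine ⟨hGaddA _ ih.1, ?_⟩
      rw [pv_ops_agree_add a n A0 _ ih.1]
      exact .add ih.2
    | rot _ ih => exact ⟨hGrotA _ ih.1, .rot ih.2⟩
  have hBA : ∀ y, pvReach (pvAddB a) (pvRotB b) s y →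
      G y ∧ pvReach (pvAddA a n) (pvRotA b) s y := by
    intro y h
    induction h with
    | refl => exact ⟨hGs, .refl s⟩
    | add _ ih =>
      refine ⟨hGaddB _ ih.1, ?_⟩
      rw [← pv_ops_agree_add a n A0 _ ih.1]
      exact .add ih.2
    | rot _ ih => exact ⟨hGrotA _ ih.1, .rot ih.2⟩
  have hsfinal : s ∈ pvLoopB a b ((n + 10) ^ n + 2) [s] := (hBmem s).2 (.refl s)
  obtain ⟨mB, hmB⟩ : ∃ mB, PySem.List.min? (pvLoopB a b ((n + 10) ^ n + 2) [s])
      (fun x => x) = some mB := by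
    cases h : PySem.List.min? (pvLoopB a b ((n + 10) ^ n + 2) [s]) (fun x => x) with
    | none =>
      rw [PySem.List.min?_eq_none_iff] at h
      rw [h] at hsfinal
      exact absurd hsfinal (List.not_mem_nil)
    | some mB => exact ⟨mB, rfl⟩
  have hBLeast : IsLeast { y | pvReach (pvAddA a n) (pvRotA b) s y } mB := by
    constructor
    · exact (hBA mB ((hBmem mB).1 (PySem.List.min?_mem hmB))).2
    · intro y hy
      exact PySem.List.min?_isMin hmB y ((hBmem y).2 (hAB y hy).2)
  show pvLoopA a b n (2 * (n + 10) ^ n + 1) [s] (PySem.Set.ofList [s]) s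
      = (PySem.List.min? (pvLoopB a b ((n + 10) ^ n + 2) (PySem.Set.ofList [s])) (fun x => x)).getD s
  rw [hofl, hmB, Option.getD_some]
  exact hALeast.unique hBLeast

-- ===== VERDICT (by name: the statement is the Claim_ definition above) =====
theorem findLexSmallestString_spec : Claim_equal_findLexSmallestString := by
  intro s a b _ _
  unfold Spec_findLexSmallestString
  exact pv_ports_eq s a b
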